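-- pv_equiv track=rewrite | github.com/cyzus/suzent | src/suzent/core/commands/model.py | _build_model_keyboard
-- ===== SOURCE A (Python) =====
-- def _build_model_keyboard(
--     models: list[str],
--     sender_id: str,
--     current_model: str,
--     page: int = 0,
--     page_size: int = 16,
-- ) -> list[list[tuple[str, str]]]:
--     """Build a 2-column inline keyboard for model selection.
--
--     Each button label shows the part after the provider prefix (e.g. 'gpt-4.1'
--     from 'openai/gpt-4.1'), with a marker on the current model.
--     Callback data: ms:{sender_id}:{global_model_index}
--     """
--     start = page * page_size
--     page_models = models[start : start + page_size]
--
--     rows: list[list[tuple[str, str]]] = []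
--     for i in range(0, len(page_models), 2):
--         row = []
--         for j in range(2):
--             if i + j >= len(page_models):
--                 break
--             global_idx = start + i + j
--             m = page_models[i + j]
--             short = m.split("/", 1)[-1]
--             label = f"• {short}" if m == current_model else short
--             row.append((label, f"ms:{sender_id}:{global_idx}"))
--         rows.append(row)
--
--     # Pagination row
--     total_pages = (len(models) + page_size - 1) // page_size
--     if total_pages > 1:
--         nav = []
--         if page > 0:
--             nav.append(("◀ Prev", f"mp:{sender_id}:{page - 1}"))
--         if page < total_pages - 1:
--             nav.append(("Next ▶", f"mp:{sender_id}:{page + 1}"))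
--         if nav:
--             rows.append(nav)
--
--     return rows
-- ===== SOURCE B (Python) =====
-- def _build_model_keyboard(
--     models: list[str],
--     sender_id: str,
--     current_model: str,
--     page: int = 0,
--     page_size: int = 16,
-- ) -> list[list[tuple[str, str]]]:
--     """Streaming pairing: one pass over the page's models with a 'pending' carry
--     that emits a completed row of two (or flushes a lone leftover at the end),
--     instead of index arithmetic over even positions with an inner break loop."""
--     start = page * page_size
--
--     rows: list[list[tuple[str, str]]] = []
--     pending = None
--     for idx, m in enumerate(models[start : start + page_size]):
--         short = m.split("/", 1)[-1]
--         label = f"• {short}" if m == current_model else short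
--         btn = (label, f"ms:{sender_id}:{start + idx}")
--         if pending is None:
--             pending = btn
--         else:
--             rows.append([pending, btn])
--             pending = None
--     if pending is not None:
--         rows.append([pending])
--
--     total_pages = (len(models) + page_size - 1) // page_size
--     if total_pages > 1:
--         nav = []
--         if page > 0:
--             nav.append(("◀ Prev", f"mp:{sender_id}:{page - 1}"))
--         if page < total_pages - 1:
--             nav.append(("Next ▶", f"mp:{sender_id}:{page + 1}"))
--         if nav:
--             rows.append(nav)
--     return rows
-- ===== Notes on version B (the rewrite author's own statement) =====
-- stated objective: alternative
-- what changed: Replaces A's outer loop over even indices with an inner 2-step break loop by a single streaming pass that carries a 'pending' half-row and emits a row each time a pair completes (flushing a lone leftover at the end); pagination logic unchanged.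
import Mathlib
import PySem

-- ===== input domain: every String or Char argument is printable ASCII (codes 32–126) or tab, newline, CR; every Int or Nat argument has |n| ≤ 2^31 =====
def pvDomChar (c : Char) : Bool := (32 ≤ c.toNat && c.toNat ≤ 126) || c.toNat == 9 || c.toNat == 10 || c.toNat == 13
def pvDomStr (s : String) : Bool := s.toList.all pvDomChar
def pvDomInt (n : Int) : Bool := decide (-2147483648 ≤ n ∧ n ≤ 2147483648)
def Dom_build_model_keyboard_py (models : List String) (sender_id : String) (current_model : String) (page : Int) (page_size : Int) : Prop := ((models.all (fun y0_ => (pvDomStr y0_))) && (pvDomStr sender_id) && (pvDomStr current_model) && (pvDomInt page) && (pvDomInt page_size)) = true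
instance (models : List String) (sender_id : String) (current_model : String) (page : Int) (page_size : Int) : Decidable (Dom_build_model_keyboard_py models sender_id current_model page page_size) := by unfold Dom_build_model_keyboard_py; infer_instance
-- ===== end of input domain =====

-- B replaces A's even-index outer loop with inner break loop by a single streaming pass
-- with a 'pending' carry that emits a row whenever a pair completes; return values proved
-- equal wherever A returns (page_size ≠ 0).

-- ===== PORT A =====
-- m.split("/", 1)[-1]  (splitMax? is some since "/" ≠ ""; [-1] via pyGetD, the list is nonempty)
def pvShort (m : String) : String :=
  PySem.List.pyGetD ((PySem.Str.splitMax? m "/" 1).getD []) (-1) ""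

-- one button: (label with '• ' marker on the current model, "ms:{sender_id}:{global_idx}")
def pvBtn (sender_id current_model : String) (global_idx : Int) (m : String) : String × String :=
  let short := pvShort m
  let label := if m == current_model then "• " ++ short else short
  (label, "ms:" ++ sender_id ++ ":" ++ PySem.Int.toStr global_idx)

def build_model_keyboard_py (models : List String) (sender_id : String) (current_model : String) (page : Int) (page_size : Int) : List (List (String × String)) :=
  let start := page * page_size
  let page_models := PySem.List.slice models (some start) (some (start + page_size))
  -- for i in range(0, len(page_models), 2): row = []; for j in range(2): if i+j >= len: break; row.append(...)
  let rows : List (List (String × String)) :=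
    (PySem.List.pyRange 0 (page_models.length : Int) 2).foldl
      (fun rows i =>
        let row := ((PySem.List.pyRange 0 2 1).foldl
          (fun (st : List (String × String) × Bool) j =>
            if st.2 then st                             -- already broken out
            else if i + j ≥ (page_models.length : Int) then (st.1, true)   -- break
            else (st.1 ++ [pvBtn sender_id current_model (start + i + j) (PySem.List.pyGetD page_models (i + j) "")], false))
          ([], false)).1
        rows ++ [row])
      []
  let total_pages := PySem.Int.floordiv ((models.length : Int) + page_size - 1) page_size
  if total_pages > 1 then
    let nav : List (String × String) := []
    let nav := if page > 0 then nav ++ [("◀ Prev", "mp:" ++ sender_id ++ ":" ++ PySem.Int.toStr (page - 1))] else nav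
    let nav := if page < total_pages - 1 then nav ++ [("Next ▶", "mp:" ++ sender_id ++ ":" ++ PySem.Int.toStr (page + 1))] else nav
    if nav ≠ [] then rows ++ [nav] else rows
  else rows

-- ===== PORT B =====
-- loop body of B: carry a pending half-row; a completed pair is emitted as a row
def pvStep (sender_id current_model : String) (start : Int)
    (st : List (List (String × String)) × Option (String × String)) (p : Int × String) :
    List (List (String × String)) × Option (String × String) :=
  match st.2 with
  | none => (st.1, some (pvBtn sender_id current_model (start + p.1) p.2))
  | some pnd => (st.1 ++ [[pnd, pvBtn sender_id current_model (start + p.1) p.2]], none)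

-- 'if pending is not None: rows.append([pending])'
def pvFlush (st : List (List (String × String)) × Option (String × String)) : List (List (String × String)) :=
  match st.2 with
  | none => st.1
  | some pnd => st.1 ++ [[pnd]]

def build_model_keyboard_py_alt (models : List String) (sender_id : String) (current_model : String) (page : Int) (page_size : Int) : List (List (String × String)) :=
  let start := page * page_size
  let page_models := PySem.List.slice models (some start) (some (start + page_size))
  -- single pass: for idx, m in enumerate(page_models): … pending/emit …
  let st := (PySem.List.enumerate page_models 0).foldl (pvStep sender_id current_model start) ([], none)
  let rows := pvFlush st
  let total_pages := PySem.Int.floordiv ((models.length : Int) + page_size - 1) page_size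
  if total_pages > 1 then
    let nav : List (String × String) := []
    let nav := if page > 0 then nav ++ [("◀ Prev", "mp:" ++ sender_id ++ ":" ++ PySem.Int.toStr (page - 1))] else nav
    let nav := if page < total_pages - 1 then nav ++ [("Next ▶", "mp:" ++ sender_id ++ ":" ++ PySem.Int.toStr (page + 1))] else nav
    if nav ≠ [] then rows ++ [nav] else rows
  else rows

-- ===== PRECONDITION & SPEC =====
-- Pre_ excludes exactly page_size = 0, where Python A raises ZeroDivisionError in the total_pages division.
def Pre_build_model_keyboard_py (models : List String) (sender_id : String) (current_model : String) (page : Int) (page_size : Int) : Prop := page_size ≠ 0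
instance (models : List String) (sender_id : String) (current_model : String) (page : Int) (page_size : Int) : Decidable (Pre_build_model_keyboard_py models sender_id current_model page page_size) := by unfold Pre_build_model_keyboard_py; infer_instance

def pvWitness_build_model_keyboard_py : List String × String × String × Int × Int := (["openai/gpt-4.1", "anthropic/claude", "x"], "42", "openai/gpt-4.1", 0, 2)

def Spec_build_model_keyboard_py (models : List String) (sender_id : String) (current_model : String) (page : Int) (page_size : Int) (out : List (List (String × String))) : Prop := out = build_model_keyboard_py_alt models sender_id current_model page page_size
instance (models : List String) (sender_id : String) (current_model : String) (page : Int) (page_size : Int) (out : List (List (String × String))) : Decidable (Spec_build_model_keyboard_py models sender_id current_model page page_size out) := by unfold Spec_build_model_keyboard_py; infer_instance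

-- ===== CLAIM (what is proved, stated in full; the proofs are below) =====
def Claim_equal_build_model_keyboard_py : Prop := ∀ (models : List String) (sender_id : String) (current_model : String) (page : Int) (page_size : Int), Dom_build_model_keyboard_py models sender_id current_model page page_size → Pre_build_model_keyboard_py models sender_id current_model page page_size → Spec_build_model_keyboard_py models sender_id current_model page page_size (build_model_keyboard_py models sender_id current_model page page_size)

-- ===== LEMMAS AND PROOFS =====

-- reference shape both proofs meet: rows of two buttons, built two models at a time
def pvPairsG {β : Type} (g : Int → String → β) : Int → List String → List (List β)
  | _, [] => []
  | s, [m] => [[g s m]]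
  | s, a :: b :: t => [g s a, g (s + 1) b] :: pvPairsG g (s + 2) t

lemma pvPairsG_shift {β : Type} (g : Int → String → β) (c : Int) :
    ∀ (L : List String) (s : Int), pvPairsG (fun k m => g (k + c) m) s L = pvPairsG g (s + c) L
  | [], s => rfl
  | [m], s => rfl
  | a :: b :: t, s => by
    have e1 : s + 1 + c = s + c + 1 := by ring
    have e2 : s + 2 + c = s + c + 2 := by ring
    simp only [pvPairsG, pvPairsG_shift g c t (s + 2), e1, e2]

-- range(0, n+2, 2) peels its first index
lemma pv_pyRange_two_cons (n : Nat) :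
    PySem.List.pyRange 0 ((n : Int) + 2) 2 = 0 :: (PySem.List.pyRange 0 (n : Int) 2).map (· + 2) := by
  rw [PySem.List.pyRange_of_pos _ _ (by norm_num : (0:Int) < 2),
      PySem.List.pyRange_of_pos _ _ (by norm_num : (0:Int) < 2)]
  have h2 : (if (0:Int) < (n : Int) + 2 then (((n : Int) + 2 - 0 + 2 - 1) / 2).toNat else 0)
      = (if (0:Int) < (n : Int) then (((n : Int) - 0 + 2 - 1) / 2).toNat else 0) + 1 := by
    rcases Nat.eq_zero_or_pos n with h | h
    · subst h; norm_num
    · rw [if_pos (by positivity), if_pos (by exact_mod_cast h)]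
      omega
  rw [h2, List.range_succ_eq_map]
  simp [List.map_map, Function.comp]
  intro a _
  ring

-- A's break-flag row loop, folded over range(0, len, 2), builds exactly the pair rows
lemma pv_rows_eq {β : Type} [Inhabited β] :
    ∀ (L : List String) (g : Int → String → β),
    (PySem.List.pyRange 0 (L.length : Int) 2).foldl
      (fun rows i =>
        (rows ++ [((PySem.List.pyRange 0 2 1).foldl
          (fun (st : List β × Bool) j =>
            if st.2 then st
            else if i + j ≥ (L.length : Int) then (st.1, true)
            else (st.1 ++ [g (i + j) (PySem.List.pyGetD L (i + j) "")], false))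
          ([], false)).1]))
      []
    = pvPairsG g 0 L
  | [], g => by
    simp [PySem.List.pyRange_of_pos _ _ (by norm_num : (0:Int) < 2), pvPairsG]
  | [m], g => by
    have h0 : (([m].length : Nat) : Int) = 1 := by simp
    have h1 : PySem.List.pyRange 0 1 2 = [0] := by decide
    have h2 : PySem.List.pyRange 0 2 1 = [(0 : Int), 1] := by decide
    rw [h0, h1, h2]
    simp [pvPairsG, PySem.List.pyGetD, PySem.List.pyGet?, PySem.List.pyIdx?]
  | a :: b :: t, g => by
    have hlen : (((a :: b :: t).length : Int)) = (t.length : Int) + 2 := by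
      simp only [List.length_cons]; push_cast; ring
    have h2 : PySem.List.pyRange 0 2 1 = [(0 : Int), 1] := by decide
    rw [PySem.List.foldl_append_singleton_eq_map, List.nil_append, hlen, pv_pyRange_two_cons,
        List.map_cons, List.map_map]
    have hrow0 : ((PySem.List.pyRange 0 2 1).foldl
          (fun (st : List β × Bool) j =>
            if st.2 then st
            else if (0:Int) + j ≥ (t.length : Int) + 2 then (st.1, true)
            else (st.1 ++ [g (0 + j) (PySem.List.pyGetD (a :: b :: t) (0 + j) "")], false))
          ([], false)).1 = [g 0 a, g 1 b] := by
      rw [h2]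
      have c0 : ¬ ((t.length : Int) + 2 ≤ 0) := by omega
      have c1 : ¬ ((t.length : Int) + 2 ≤ 1) := by omega
      have c2 : (0:Int) ≤ (t.length : Int) + 1 := by omega
      simp [c0, c1, c2, PySem.List.pyGetD, PySem.List.pyGet?, PySem.List.pyIdx?]
    rw [hrow0]
    have hmap : ∀ i ∈ PySem.List.pyRange 0 (t.length : Int) 2,
        ((fun i => ((PySem.List.pyRange 0 2 1).foldl
            (fun (st : List β × Bool) j =>
              if st.2 then st
              else if i + j ≥ (t.length : Int) + 2 then (st.1, true)
              else (st.1 ++ [g (i + j) (PySem.List.pyGetD (a :: b :: t) (i + j) "")], false))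
            ([], false)).1) ∘ (· + 2)) i
        = (fun i => ((PySem.List.pyRange 0 2 1).foldl
            (fun (st : List β × Bool) j =>
              if st.2 then st
              else if i + j ≥ (t.length : Int) then (st.1, true)
              else (st.1 ++ [g (i + j + 2) (PySem.List.pyGetD t (i + j) "")], false))
            ([], false)).1) i := by
      intro i hi
      obtain ⟨h0, hn, -⟩ := (PySem.List.mem_pyRange_iff_of_pos (by norm_num : (0:Int) < 2) i).1 hi
      rw [h2]
      simp only [Function.comp_apply, List.foldl_cons, List.foldl_nil]
      have e0 : PySem.List.pyGetD (a :: b :: t) (i + 2 + 0) "" = PySem.List.pyGetD t (i + 0) "" := by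
        have hL : PySem.List.pyIdx? (a :: b :: t).length (i + 2 + 0) = some ((i + 0).toNat + 1 + 1) := by
          simp only [PySem.List.pyIdx?, List.length_cons]
          rw [if_pos (by omega), if_pos (by push_cast; omega)]
          congr 1; omega
        have hR : PySem.List.pyIdx? t.length (i + 0) = some (i + 0).toNat := by
          simp only [PySem.List.pyIdx?]
          rw [if_pos (by omega), if_pos (by omega)]
        simp only [PySem.List.pyGetD, PySem.List.pyGet?]
        rw [hL, hR]
        simp [List.getElem?_cons_succ]
      by_cases hlast : i + 1 ≥ (t.length : Int)
      · have d1 : i + 2 + 1 ≥ (t.length : Int) + 2 := by omega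
        have d0 : ¬ (i + 2 + 0 ≥ (t.length : Int) + 2) := by omega
        have d0' : ¬ (i + 0 ≥ (t.length : Int)) := by omega
        simp only [if_neg d0, if_neg d0', Bool.false_eq_true, if_false, if_pos d1, if_pos hlast, e0]
        have ha : i + 2 + 0 = i + 0 + 2 := by ring
        rw [ha]
      · have d1 : ¬ (i + 2 + 1 ≥ (t.length : Int) + 2) := by omega
        have d0 : ¬ (i + 2 + 0 ≥ (t.length : Int) + 2) := by omega
        have d0' : ¬ (i + 0 ≥ (t.length : Int)) := by omega
        have e1 : PySem.List.pyGetD (a :: b :: t) (i + 2 + 1) "" = PySem.List.pyGetD t (i + 1) "" := by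
          have hL : PySem.List.pyIdx? (a :: b :: t).length (i + 2 + 1) = some ((i + 1).toNat + 1 + 1) := by
            simp only [PySem.List.pyIdx?, List.length_cons]
            rw [if_pos (by omega), if_pos (by push_cast; omega)]
            congr 1; omega
          have hR : PySem.List.pyIdx? t.length (i + 1) = some (i + 1).toNat := by
            simp only [PySem.List.pyIdx?]
            rw [if_pos (by omega), if_pos (by omega)]
          simp only [PySem.List.pyGetD, PySem.List.pyGet?]
          rw [hL, hR]
          simp [List.getElem?_cons_succ]
        simp only [if_neg d0, if_neg d0', Bool.false_eq_true, if_false, if_neg d1, if_neg hlast, e0, e1]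
        have ha : i + 2 + 0 = i + 0 + 2 := by ring
        have hb : i + 2 + 1 = i + 1 + 2 := by ring
        rw [ha, hb]
    have IH := pv_rows_eq t (fun k m => g (k + 2) m)
    rw [PySem.List.foldl_append_singleton_eq_map, List.nil_append] at IH
    rw [List.map_congr_left hmap, IH, pvPairsG_shift, pvPairsG]
    norm_num

-- B's carry fold over enumerate builds the same pair rows
lemma pv_fold_eq (sid cm : String) (start : Int) :
    ∀ (L : List String) (k : Int) (acc : List (List (String × String))),
    pvFlush ((PySem.List.enumerate L k).foldl (pvStep sid cm start) (acc, none))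
      = acc ++ pvPairsG (fun j m => pvBtn sid cm (start + j) m) k L
  | [], k, acc => by simp [PySem.List.enumerate, pvFlush, pvPairsG]
  | [m], k, acc => by
    simp [PySem.List.enumerate, pvStep, pvFlush, pvPairsG]
  | a :: b :: t, k, acc => by
    rw [PySem.List.enumerate_cons, PySem.List.enumerate_cons]
    simp only [List.foldl_cons, pvStep]
    have : k + 1 + 1 = k + 2 := by ring
    rw [this, pv_fold_eq sid cm start t (k + 2) _]
    simp [pvPairsG]

-- ===== VERDICT (by name: the statement is the Claim_ definition above) =====
theorem build_model_keyboard_py_spec : Claim_equal_build_model_keyboard_py := by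
  intro models sender_id current_model page page_size _ _
  unfold Spec_build_model_keyboard_py
  unfold build_model_keyboard_py build_model_keyboard_py_alt
  simp only [add_assoc]
  rw [pv_rows_eq (PySem.List.slice models (some (page * page_size)) (some (page * page_size + page_size)))
        (fun k m => pvBtn sender_id current_model (page * page_size + k) m),
      pv_fold_eq sender_id current_model (page * page_size) _ 0 []]
  simp
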